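-- pv_equiv track=rewrite | github.com/felixrauh/conference_scheduler | src/phase2.py | _partition_greedy_variable_n
-- ===== SOURCE A (Python) =====
-- from typing import Dict, List, Set, Tuple, Optional
--
-- def compute_pairwise_compatibility(
--     tuple1: Tuple[str, ...],
--     tuple2: Tuple[str, ...],
--     preferences: Dict[str, Set[str]]
-- ) -> int:
--     """
--     Compute compatibility score between two tuples.
--
--     Higher score = more compatible (fewer participants attend both).
--     If a participant attends both tuples, putting them in the same block
--     with a gap would cause hopping.
--
--     Returns negative of "conflict count" - pairs with fewer conflicts are better.
--     """
--     conflict = 0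
--     for prefs in preferences.values():
--         attends_1 = any(t in prefs for t in tuple1)
--         attends_2 = any(t in prefs for t in tuple2)
--         if attends_1 and attends_2:
--             conflict += 1
--     return -conflict  # Higher is better (less conflict)
--
-- def _partition_greedy_variable_n(
--     tuples_by_n: Dict[int, List[Tuple[str, ...]]],
--     block_specs: List[Tuple[int, int, int, str]],
--     preferences: Dict[str, Set[str]],
--     perturbation_positions: Optional[Set[Tuple[int, int]]] = None
-- ) -> List[Tuple[List[Tuple[str, ...]], str]]:
--     """
--     Greedy partition respecting tuple size constraints.
--
--     For each n, partition the n-tuples into blocks of that size.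
--
--     Args:
--         tuples_by_n: {n: [tuples of size n]}
--         block_specs: [(n, k, count, block_type), ...]
--         preferences: Participant preferences
--         perturbation_positions: Optional set of (block_idx, position) pairs where
--             the second-best option should be chosen instead of the best.
--             Used for retry logic when previous partition was infeasible.
--
--     Returns:
--         List of (unordered tuple group, block_type) for each block
--     """
--     if perturbation_positions is None:
--         perturbation_positions = set()
--
--     # Make mutable copies
--     remaining_by_n = {n: list(tuples) for n, tuples in tuples_by_n.items()}
--
--     result = []
--     block_idx = 0
--
--     # Process each block spec
--     for n, k, count, block_type in block_specs:
--         remaining = remaining_by_n.get(n, [])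
--
--         for _ in range(count):
--             block_tuples = []
--             position = 0
--
--             while len(block_tuples) < k and remaining:
--                 if not block_tuples:
--                     # Pick first tuple
--                     chosen = remaining[0]
--                 else:
--                     # Rank all candidates by compatibility score
--                     candidates_with_scores = []
--                     for candidate in remaining:
--                         score = sum(
--                             compute_pairwise_compatibility(
--                                 candidate, member, preferences)
--                             for member in block_tuples
--                         )
--                         candidates_with_scores.append((candidate, score))
--
--                     # Sort by score descending (higher = better)
--                     candidates_with_scores.sort(
--                         key=lambda x: x[1], reverse=True)
--
--                     # Check if we should perturb (pick second-best)
--                     if (block_idx, position) in perturbation_positions and len(candidates_with_scores) > 1: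
--                         chosen = candidates_with_scores[1][0]  # Second-best
--                     else:
--                         chosen = candidates_with_scores[0][0]  # Best
--
--                 block_tuples.append(chosen)
--                 remaining.remove(chosen)
--                 position += 1
--
--             result.append((block_tuples, block_type))
--             block_idx += 1
--
--         remaining_by_n[n] = remaining
--
--     return result
-- ===== SOURCE B (Python) =====
-- from typing import Dict, List, Set, Tuple, Optional
--
--
-- def _partition_greedy_variable_n(
--     tuples_by_n: Dict[int, List[Tuple[str, ...]]],
--     block_specs: List[Tuple[int, int, int, str]],
--     preferences: Dict[str, Set[str]],
--     perturbation_positions: Optional[Set[Tuple[int, int]]] = None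
-- ) -> List[Tuple[List[Tuple[str, ...]], str]]:
--     """Same greedy partition, but: each tuple's attendance index-set is computed
--     once (memoized, on first use), candidate scores are maintained incrementally
--     as members join a block, and best/second-best are found by linear scans
--     instead of rescoring every candidate against the whole block and sorting."""
--     if perturbation_positions is None:
--         perturbation_positions = set()
--
--     pref_list = list(preferences.values())
--     att_cache = {}
--
--     def att_of(t):
--         a = att_cache.get(t)
--         if a is None:
--             a = frozenset(i for i, prefs in enumerate(pref_list)
--                           if any(x in prefs for x in t))
--             att_cache[t] = a
--         return a
--
--     remaining_by_n = {n: list(ts) for n, ts in tuples_by_n.items()}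
--
--     result = []
--     block_idx = 0
--
--     for n, k, count, block_type in block_specs:
--         rem = remaining_by_n.get(n, [])
--
--         for _ in range(count):
--             block = []
--             # scores[i] = sum of pairwise compatibilities of rem[i] with block
--             scores = [0] * len(rem)
--             position = 0
--
--             while len(block) < k and rem:
--                 if not block:
--                     chosen = rem[0]
--                 else:
--                     # first index with maximal score (= best of A's stable sort)
--                     best, best_s = 0, scores[0]
--                     for i, s in enumerate(scores):
--                         if s > best_s:
--                             best, best_s = i, s
--                     if (block_idx, position) in perturbation_positions and len(rem) > 1:
--                         # second entry of the stable sort = first maximum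
--                         # among the entries other than `best`
--                         second = 0 if best != 0 else 1
--                         second_s = scores[second]
--                         for i, s in enumerate(scores):
--                             if i != best and s > second_s:
--                                 second, second_s = i, s
--                         chosen = rem[second]
--                     else:
--                         chosen = rem[best]
--
--                 # drop the FIRST occurrence of the chosen value (as list.remove does)
--                 j = rem.index(chosen)
--                 rem = rem[:j] + rem[j + 1:]
--                 block.append(chosen)
--                 position += 1
--                 if len(block) < k and rem:
--                     # a further selection follows: update the scores
--                     # incrementally -- joining `chosen` costs each remaining
--                     # candidate the size of its attendance overlap with `chosen`
--                     ca = att_of(chosen)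
--                     scores = [s - len(ca & att_of(t))
--                               for s, t in zip(scores[:j] + scores[j + 1:], rem)]
--
--             result.append((block, block_type))
--             block_idx += 1
--
--         remaining_by_n[n] = rem
--
--     return result
-- ===== Notes on version B (the rewrite author's own statement) =====
-- stated objective: alternative
-- what changed: Per-tuple attendance index-sets are memoized (computed once, on first use), each candidate's score against the growing block is updated incrementally via one set-intersection per new member instead of being recomputed from scratch, and the best/second-best candidate is found by linear scans instead of building and sorting a full (candidate, score) list at every position.
import Mathlib
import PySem

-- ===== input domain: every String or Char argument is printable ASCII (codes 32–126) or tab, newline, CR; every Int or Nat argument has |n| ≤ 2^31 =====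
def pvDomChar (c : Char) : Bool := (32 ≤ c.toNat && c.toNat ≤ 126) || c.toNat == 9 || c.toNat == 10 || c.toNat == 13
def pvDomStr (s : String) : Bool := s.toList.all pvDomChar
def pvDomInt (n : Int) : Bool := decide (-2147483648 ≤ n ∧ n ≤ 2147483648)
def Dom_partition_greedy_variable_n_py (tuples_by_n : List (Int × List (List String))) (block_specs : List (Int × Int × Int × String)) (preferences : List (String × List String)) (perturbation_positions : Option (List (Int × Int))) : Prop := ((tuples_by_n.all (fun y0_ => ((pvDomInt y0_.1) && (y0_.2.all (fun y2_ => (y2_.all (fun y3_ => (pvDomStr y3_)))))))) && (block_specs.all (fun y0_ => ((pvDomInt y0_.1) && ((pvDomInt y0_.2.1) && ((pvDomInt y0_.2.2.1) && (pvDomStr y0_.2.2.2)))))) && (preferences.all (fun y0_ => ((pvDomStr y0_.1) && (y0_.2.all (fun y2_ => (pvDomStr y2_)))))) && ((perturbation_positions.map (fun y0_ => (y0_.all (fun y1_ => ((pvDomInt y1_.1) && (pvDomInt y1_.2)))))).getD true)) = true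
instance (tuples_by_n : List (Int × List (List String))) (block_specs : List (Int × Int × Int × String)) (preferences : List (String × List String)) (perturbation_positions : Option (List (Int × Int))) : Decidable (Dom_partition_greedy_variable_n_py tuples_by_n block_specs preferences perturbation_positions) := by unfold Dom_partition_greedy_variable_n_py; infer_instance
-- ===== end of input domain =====

-- B replaces A's per-position rescoring-and-sorting by memoized attendance
-- index-sets, incrementally maintained candidate scores and two linear scans
-- for best/second-best; same return value on every input.

-- ===== PORT A =====

/-- compute_pairwise_compatibility: the preferences dict is consumed only through
    its values, each used only for membership tests, so porting the sets as the
    distinct-element lists is exact. -/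
def pvCompatA (t1 t2 : List String) (prefvals : List (List String)) : Int :=
  -(prefvals.foldl (fun conflict prefs =>
      if (t1.any fun t => prefs.contains t) && (t2.any fun t => prefs.contains t)
      then conflict + 1 else conflict) 0)

/-- The `while len(block_tuples) < k and remaining` loop of A.  `fuel` is the
    entry value of `remaining.length`: each executed iteration removes exactly one
    element of `remaining`, so the loop condition fails on its own no later than
    the fuel does — the fuel only makes the recursion structural. -/
def pvWhileA (prefvals : List (List String)) (pp : PySem.Set (Int × Int))
    (blockIdx : Int) (k : Int) :
    Nat → List (List String) → List (List String) → Int →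
    List (List String) × List (List String)
  | 0, blockTuples, remaining, _ => (blockTuples, remaining)
  | fuel+1, blockTuples, remaining, position =>
    if (blockTuples.length : Int) < k ∧ remaining ≠ [] then
      let chosen :=
        if blockTuples.isEmpty then
          remaining.headD []          -- remaining[0]; remaining ≠ [] here
        else
          let cws := remaining.map fun c =>
            (c, (blockTuples.map fun m => pvCompatA c m prefvals).sum)
          let sortedCws := PySem.List.sorted cws (fun x => x.2) true
          if pp.contains (blockIdx, position) ∧ 1 < cws.length then
            (PySem.List.pyGetD sortedCws 1 ([], 0)).1   -- in range: 1 < length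
          else
            (PySem.List.pyGetD sortedCws 0 ([], 0)).1   -- in range: 0 < length
      -- remaining.remove(chosen): never a ValueError, chosen is drawn from remaining
      let remaining' := match PySem.List.remove? remaining chosen with
        | some r => r
        | none => remaining
      pvWhileA prefvals pp blockIdx k fuel (blockTuples ++ [chosen]) remaining' (position + 1)
    else (blockTuples, remaining)

/-- The `for _ in range(count)` loop of A; returns (result, remaining, block_idx). -/
def pvCountA (prefvals : List (List String)) (pp : PySem.Set (Int × Int))
    (k : Int) (btype : String) :
    Nat → List (List String) → List (List (List String) × String) → Int →
    List (List (List String) × String) × List (List String) × Int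
  | 0, remaining, result, blockIdx => (result, remaining, blockIdx)
  | c+1, remaining, result, blockIdx =>
    let st := pvWhileA prefvals pp blockIdx k remaining.length [] remaining 0
    pvCountA prefvals pp k btype c st.2 (result ++ [(st.1, btype)]) (blockIdx + 1)

/-- The `for n, k, count, block_type in block_specs` loop of A. -/
def pvSpecsA (prefvals : List (List String)) (pp : PySem.Set (Int × Int)) :
    List (Int × Int × Int × String) → PySem.Dict Int (List (List String)) →
    List (List (List String) × String) → Int → List (List (List String) × String)
  | [], _, result, _ => result
  | (n, k, count, btype) :: rest, d, result, blockIdx =>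
    let remaining := d.getD n []
    -- range(count) runs max(count, 0) times
    let st := pvCountA prefvals pp k btype count.toNat remaining result blockIdx
    pvSpecsA prefvals pp rest (d.insert n st.2.1) st.1 st.2.2

def partition_greedy_variable_n_py (tuples_by_n : List (Int × List (List String))) (block_specs : List (Int × Int × Int × String)) (preferences : List (String × List String)) (perturbation_positions : Option (List (Int × Int))) : List (List (List String) × String) :=
  let pp : PySem.Set (Int × Int) := perturbation_positions.getD PySem.Set.empty
  -- {n: list(tuples) for n, tuples in tuples_by_n.items()}: keys stay unique,
  -- each value replaced by a copy of itself
  let remaining_by_n : PySem.Dict Int (List (List String)) :=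
    ⟨(PySem.Dict.ofList tuples_by_n).items.map fun p => (p.1, p.2)⟩
  pvSpecsA (PySem.Dict.ofList preferences).values pp block_specs remaining_by_n [] 0

-- ===== PORT B =====

/-- attend_set(t): the frozenset of indices of preference entries one of whose
    preferred talks occurs in the tuple. -/
def pvAttendB (prefList : List (List String)) (tup : List String) : PySem.Set Int :=
  PySem.Set.ofList ((PySem.List.enumerate prefList).filterMap fun ip =>
    if tup.any fun t => ip.2.contains t then some ip.1 else none)

/-- att_of: memoized attendance lookup (att_cache.get, compute and store on a miss). -/
def pvAttOf (prefList : List (List String))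
    (cache : PySem.Dict (List String) (PySem.Set Int)) (t : List String) :
    PySem.Set Int × PySem.Dict (List String) (PySem.Set Int) :=
  match cache.get? t with
  | some a => (a, cache)
  | none =>
    let a := pvAttendB prefList t
    (a, cache.insert t a)

/-- B's first scan: first index with maximal score, as (index, score). -/
def pvBestB (scores : List Int) : Int × Int :=
  (PySem.List.enumerate scores).foldl
    (fun b is => if is.2 > b.2 then is else b) (0, scores.headD 0)

/-- B's second scan: first maximum among the indices other than `best`. -/
def pvSecondB (scores : List Int) (best : Int) : Int × Int :=
  let s0 : Int := if best ≠ 0 then 0 else 1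
  (PySem.List.enumerate scores).foldl
    (fun b is => if is.1 ≠ best ∧ is.2 > b.2 then is else b)
    (s0, PySem.List.pyGetD scores s0 0)

/-- The update comprehension `[s - len(ca & att_of(t)) for s, t in zip(..., rem)]`,
    threading the memo cache left to right exactly as Python evaluates it. -/
def pvUpdScores (prefList : List (List String)) :
    PySem.Dict (List String) (PySem.Set Int) → PySem.Set Int → List Int →
    List (List String) → List Int × PySem.Dict (List String) (PySem.Set Int)
  | cache, _, [], _ => ([], cache)
  | cache, _, _ :: _, [] => ([], cache)
  | cache, ca, s :: ss, t :: ts =>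
    let r1 := pvAttOf prefList cache t
    let rest := pvUpdScores prefList r1.2 ca ss ts
    ((s - PySem.Set.len (PySem.Set.inter ca r1.1)) :: rest.1, rest.2)

/-- B's while loop over the tuple pool, the parallel score list and the memo cache. -/
def pvWhileB (prefList : List (List String)) (pp : PySem.Set (Int × Int))
    (blockIdx k : Int) :
    Nat → List (List String) → List (List String) → List Int →
    PySem.Dict (List String) (PySem.Set Int) → Int →
    List (List String) × List (List String) × PySem.Dict (List String) (PySem.Set Int)
  | 0, block, rem, _, cache, _ => (block, rem, cache)
  | fuel+1, block, rem, scores, cache, position =>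
    if (block.length : Int) < k ∧ rem ≠ [] then
      let chosen :=
        if block.isEmpty then rem.headD []   -- rem[0]; rem ≠ [] here
        else
          let best := pvBestB scores
          if pp.contains (blockIdx, position) ∧ 1 < rem.length then
            PySem.List.pyGetD rem (pvSecondB scores best.1).1 []   -- in range
          else
            PySem.List.pyGetD rem best.1 []                        -- in range
      -- rem.index(...): never a ValueError, chosen is drawn from rem
      let j := (PySem.List.index? rem chosen).getD 0
      let rem' := rem.eraseIdx j              -- rem[:j] + rem[j+1:]
      let block' := block ++ [chosen]
      let st :=
        if (block'.length : Int) < k ∧ rem' ≠ [] then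
          -- a further selection follows: update the scores incrementally
          let r1 := pvAttOf prefList cache chosen
          pvUpdScores prefList r1.2 r1.1 (scores.eraseIdx j) rem'
        else (scores, cache)
      pvWhileB prefList pp blockIdx k fuel block' rem' st.1 st.2 (position + 1)
    else (block, rem, cache)

/-- B's `for _ in range(count)` loop; returns (result, rem, cache, block_idx). -/
def pvCountB (prefList : List (List String)) (pp : PySem.Set (Int × Int))
    (k : Int) (btype : String) :
    Nat → List (List String) → List (List (List String) × String) →
    PySem.Dict (List String) (PySem.Set Int) → Int →
    List (List (List String) × String) × List (List String) ×
      PySem.Dict (List String) (PySem.Set Int) × Int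
  | 0, rem, result, cache, blockIdx => (result, rem, cache, blockIdx)
  | c+1, rem, result, cache, blockIdx =>
    let st := pvWhileB prefList pp blockIdx k rem.length [] rem
      (List.replicate rem.length 0) cache 0
    pvCountB prefList pp k btype c st.2.1 (result ++ [(st.1, btype)]) st.2.2 (blockIdx + 1)

/-- B's loop over block_specs. -/
def pvSpecsB (prefList : List (List String)) (pp : PySem.Set (Int × Int)) :
    List (Int × Int × Int × String) → PySem.Dict Int (List (List String)) →
    List (List (List String) × String) → PySem.Dict (List String) (PySem.Set Int) → Int →
    List (List (List String) × String)
  | [], _, result, _, _ => result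
  | (n, k, count, btype) :: rest, d, result, cache, blockIdx =>
    let rem := d.getD n []
    let st := pvCountB prefList pp k btype count.toNat rem result cache blockIdx
    pvSpecsB prefList pp rest (d.insert n st.2.1) st.1 st.2.2.1 st.2.2.2

def partition_greedy_variable_n_py_alt (tuples_by_n : List (Int × List (List String))) (block_specs : List (Int × Int × Int × String)) (preferences : List (String × List String)) (perturbation_positions : Option (List (Int × Int))) : List (List (List String) × String) :=
  let pp : PySem.Set (Int × Int) := perturbation_positions.getD PySem.Set.empty
  let prefList := (PySem.Dict.ofList preferences).values
  -- {n: list(ts) for n, ts in tuples_by_n.items()}: keys stay unique,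
  -- each value replaced by a copy of itself
  let remaining_by_n : PySem.Dict Int (List (List String)) :=
    ⟨(PySem.Dict.ofList tuples_by_n).items.map fun p => (p.1, p.2)⟩
  pvSpecsB prefList pp block_specs remaining_by_n [] PySem.Dict.empty 0

-- ===== PRECONDITION & SPEC =====
def Spec_partition_greedy_variable_n_py (tuples_by_n : List (Int × List (List String))) (block_specs : List (Int × Int × Int × String)) (preferences : List (String × List String)) (perturbation_positions : Option (List (Int × Int))) (out : List (List (List String) × String)) : Prop := out = partition_greedy_variable_n_py_alt tuples_by_n block_specs preferences perturbation_positions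
instance (tuples_by_n : List (Int × List (List String))) (block_specs : List (Int × Int × Int × String)) (preferences : List (String × List String)) (perturbation_positions : Option (List (Int × Int))) (out : List (List (List String) × String)) : Decidable (Spec_partition_greedy_variable_n_py tuples_by_n block_specs preferences perturbation_positions out) := by unfold Spec_partition_greedy_variable_n_py; infer_instance

-- ===== CLAIM (what is proved, stated in full; the proofs are below) =====
def Claim_equal_partition_greedy_variable_n_py : Prop := ∀ (tuples_by_n : List (Int × List (List String))) (block_specs : List (Int × Int × Int × String)) (preferences : List (String × List String)) (perturbation_positions : Option (List (Int × Int))), Dom_partition_greedy_variable_n_py tuples_by_n block_specs preferences perturbation_positions → Spec_partition_greedy_variable_n_py tuples_by_n block_specs preferences perturbation_positions (partition_greedy_variable_n_py tuples_by_n block_specs preferences perturbation_positions)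

-- ===== LEMMAS AND PROOFS =====

-- misc
theorem pv_map_eraseIdx {α β : Type} (f : α → β) (l : List α) (i : Nat) :
    (l.map f).eraseIdx i = (l.eraseIdx i).map f := by
  induction l generalizing i with
  | nil => simp
  | cons x t ih => cases i <;> simp [List.eraseIdx, ih]

theorem pv_getD_map {α β : Type} (f : α → β) (l : List α) (i : Nat) (h : i < l.length)
    (d : β) (d' : α) : (l.map f).getD i d = f (l.getD i d') := by
  rw [List.getD_eq_getElem _ _ (by simpa using h), List.getD_eq_getElem _ _ h]
  simp

theorem pv_zipWith_map_left {α β γ : Type} (f : β → α → γ) (g : α → β) (l : List α) :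
    List.zipWith f (l.map g) l = l.map (fun x => f (g x) x) := by
  induction l with
  | nil => rfl
  | cons x t ih => simp [ih]

theorem pv_remove?_eraseIdx {α : Type} [BEq α] [LawfulBEq α] (r : List α) (c : α) (h : c ∈ r) :
    PySem.List.remove? r c = some (r.eraseIdx ((List.idxOf? c r).getD 0)) := by
  induction r with
  | nil => simp at h
  | cons x t ih =>
    by_cases hx : x = c
    · subst hx; simp [PySem.List.remove?_cons_self, List.idxOf?_cons]
    · have hmem : c ∈ t := by cases h with | head => exact absurd rfl hx | tail _ h => exact h
      have hne : ¬ x = c := hx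
      rw [PySem.List.remove?_cons_of_ne t hne, ih hmem]
      obtain ⟨j, hj⟩ : ∃ j, List.idxOf? c t = some j := by
        cases hj : List.idxOf? c t with
        | none => exact absurd (List.idxOf?_eq_none_iff.mp hj) (by simpa using hmem)
        | some j => exact ⟨j, rfl⟩
      simp [List.idxOf?_cons, hne, hj]

theorem pv_map_const_replicate {α : Type} (l : List α) (n : Int) :
    l.map (fun _ => n) = List.replicate l.length n := by
  induction l with
  | nil => rfl
  | cons x t ih => simp [ih, List.replicate_succ]

theorem pv_ofList_nodup {α : Type} [BEq α] [LawfulBEq α] (l : List α) (h : l.Nodup) :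
    PySem.Set.ofList l = l := by
  suffices H : ∀ acc : List α, (acc ++ l).Nodup → List.foldl PySem.Set.add acc l = acc ++ l by
    simpa using H [] (by simpa using h)
  clear h
  induction l with
  | nil => intro acc _; simp
  | cons x t ih =>
    intro acc hnd
    have hx : x ∉ acc := fun hmem =>
      (List.disjoint_of_nodup_append hnd) hmem List.mem_cons_self
    have : List.foldl PySem.Set.add acc (x :: t) = List.foldl PySem.Set.add (acc ++ [x]) t := by
      simp [PySem.Set.add, hx]
    rw [this, ih (acc ++ [x]) (by simpa using hnd)]
    simp

-- attendance
def pvAttFrom (P : List (List String)) (s : Int) (tup : List String) : List Int :=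
  (PySem.List.enumerate P s).filterMap fun ip =>
    if tup.any fun t => ip.2.contains t then some ip.1 else none

theorem pv_attFrom_cons (p : List String) (P : List (List String)) (s : Int) (tup : List String) :
    pvAttFrom (p :: P) s tup
      = (if tup.any (fun t => p.contains t) then [s] else []) ++ pvAttFrom P (s+1) tup := by
  simp only [pvAttFrom, PySem.List.enumerate]
  split <;> simp_all

theorem pv_attFrom_ge (P : List (List String)) (tup : List String) :
    ∀ (s : Int), ∀ i ∈ pvAttFrom P s tup, s ≤ i := by
  induction P with
  | nil => intro s i hi; simp [pvAttFrom, PySem.List.enumerate] at hi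
  | cons p t ih =>
    intro s i hi
    rw [pv_attFrom_cons] at hi
    rcases List.mem_append.mp hi with h | h
    · split at h <;> simp_all
    · have := ih (s+1) i h; omega

theorem pv_attFrom_nodup (P : List (List String)) (tup : List String) :
    ∀ (s : Int), (pvAttFrom P s tup).Nodup := by
  induction P with
  | nil => intro s; simp [pvAttFrom, PySem.List.enumerate]
  | cons p Pt ih =>
    intro s
    rw [pv_attFrom_cons]
    split
    · refine List.Nodup.append (by simp) (ih (s+1)) ?_
      intro a ha hmem
      simp at ha
      have := pv_attFrom_ge Pt tup (s+1) a hmem; omega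
    · simpa using ih (s+1)

theorem pv_inter_attFrom (t1 t2 : List String) (P : List (List String)) : ∀ (s : Int),
    ((pvAttFrom P s t1).filter (fun i => (pvAttFrom P s t2).contains i)).length
      = P.countP (fun prefs => (t1.any fun t => prefs.contains t) && (t2.any fun t => prefs.contains t)) := by
  induction P with
  | nil => intro s; simp [pvAttFrom, PySem.List.enumerate]
  | cons p Pt ih =>
    intro s
    rw [pv_attFrom_cons, pv_attFrom_cons]
    have hg2 : ∀ i ∈ pvAttFrom Pt (s+1) t2, ¬ (i = s) := fun i hi h => by
      have := pv_attFrom_ge Pt t2 (s+1) i hi; omega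
    have hg1 : ∀ i ∈ pvAttFrom Pt (s+1) t1, ¬ (i = s) := fun i hi h => by
      have := pv_attFrom_ge Pt t1 (s+1) i hi; omega
    have htail : ∀ i ∈ pvAttFrom Pt (s+1) t1,
        ((if t2.any (fun t => p.contains t) then [s] else []) ++ pvAttFrom Pt (s+1) t2).contains i
          = (pvAttFrom Pt (s+1) t2).contains i := by
      intro i hi
      split
      · simp [hg1 i hi]
      · simp
    have hfilt : (pvAttFrom Pt (s+1) t1).filter
          (fun i => ((if t2.any (fun t => p.contains t) then [s] else []) ++ pvAttFrom Pt (s+1) t2).contains i)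
        = (pvAttFrom Pt (s+1) t1).filter (fun i => (pvAttFrom Pt (s+1) t2).contains i) :=
      List.filter_congr htail
    have hsnot2 : s ∉ pvAttFrom Pt (s+1) t2 := fun h => hg2 s h rfl
    by_cases h1 : t1.any (fun t => p.contains t) <;> by_cases h2 : t2.any (fun t => p.contains t) <;>
      simp only [h1, h2, if_true, List.singleton_append,
        List.filter_cons, List.countP_cons, hfilt] <;>
      simp_all [hsnot2, ih (s+1)]

theorem pv_compat_eq (c m : List String) (P : List (List String)) :
    pvCompatA c m P = -(PySem.Set.len (PySem.Set.inter (pvAttendB P m) (pvAttendB P c))) := by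
  have hofl : ∀ t, pvAttendB P t = pvAttFrom P 0 t := fun t =>
    pv_ofList_nodup _ (pv_attFrom_nodup P t 0)
  have hcnt : pvCompatA c m P
      = -(P.countP (fun prefs => (c.any fun t => prefs.contains t) && (m.any fun t => prefs.contains t)) : Int) := by
    simp only [pvCompatA]
    rw [PySem.List.foldl_count_if]
    simp
  rw [hcnt, hofl, hofl]
  have : PySem.Set.inter (pvAttFrom P 0 m) (pvAttFrom P 0 c)
      = (pvAttFrom P 0 m).filter (fun i => (pvAttFrom P 0 c).contains i) := rfl
  rw [this]
  have := pv_inter_attFrom m c P 0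
  rw [PySem.Set.len, this]
  congr 2
  apply List.countP_congr
  intro prefs _
  simp [Bool.and_comm]

-- first-maximum machinery
def pvM : List Int → Int
  | [] => 0
  | s :: rest => if rest = [] then s else max s (pvM rest)

def pvFmi : List Int → Nat
  | [] => 0
  | s :: rest => if rest ≠ [] ∧ pvM rest > s then pvFmi rest + 1 else 0

theorem pvM_cons (s : Int) (rest : List Int) (h : rest ≠ []) :
    pvM (s :: rest) = max s (pvM rest) := by simp [pvM, h]

theorem pvFmi_lt (l : List Int) (h : l ≠ []) : pvFmi l < l.length := by
  induction l with
  | nil => simp at h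
  | cons s rest ih =>
    by_cases hr : rest = []
    · subst hr; simp [pvFmi]
    · simp only [pvFmi]
      split
      · have := ih hr; simpa using Nat.succ_lt_succ this
      · simp

theorem pv_getD_fmi (l : List Int) (h : l ≠ []) (d : Int) : l.getD (pvFmi l) d = pvM l := by
  induction l with
  | nil => simp at h
  | cons s rest ih =>
    by_cases hr : rest = []
    · subst hr; simp [pvFmi, pvM]
    · rw [pvM_cons s rest hr]
      simp only [pvFmi]
      by_cases hc : rest ≠ [] ∧ pvM rest > s
      · rw [if_pos hc]
        simp only [List.getD_cons_succ]
        rw [ih hr]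
        omega
      · rw [if_neg hc]
        simp only [List.getD_cons_zero]
        have hle : pvM rest ≤ s := by
          by_contra hgt
          exact hc ⟨hr, by omega⟩
        omega

theorem pvM_snoc (l : List Int) (v : Int) (h : l ≠ []) : pvM (l ++ [v]) = max (pvM l) v := by
  induction l with
  | nil => simp at h
  | cons s rest ih =>
    by_cases hr : rest = []
    · subst hr; simp [pvM]
    · rw [List.cons_append, pvM_cons s (rest ++ [v]) (by simp), pvM_cons s rest hr, ih hr]
      omega

theorem pvFmi_snoc (l : List Int) (v : Int) (h : l ≠ []) :
    pvFmi (l ++ [v]) = if pvM l < v then l.length else pvFmi l := by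
  induction l with
  | nil => simp at h
  | cons s rest ih =>
    by_cases hr : rest = []
    · subst hr
      by_cases hv : s < v <;> simp [pvFmi, pvM, hv] <;> omega
    · rw [List.cons_append]
      simp only [pvFmi]
      rw [ih hr, pvM_snoc rest v hr, pvM_cons s rest hr]
      have h1 : (rest ++ [v]) ≠ [] := by simp
      simp only [h1, hr, ne_eq, not_false_iff, true_and]
      split_ifs <;> first | rfl | omega | (simp; omega)

theorem pv_getD_irrel {α : Type} (l : List α) (i : Nat) (h : i < l.length) (d d' : α) :
    l.getD i d = l.getD i d' := by
  rw [List.getD_eq_getElem _ _ h, List.getD_eq_getElem _ _ h]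

def pvBestFold {α : Type} (ts : List (α × Int)) (b : α × Int) : α × Int :=
  ts.foldl (fun b is => if is.2 > b.2 then is else b) b

theorem pv_bestFold_eq {α : Type} (ts : List (α × Int)) : ∀ (b : α × Int),
    pvBestFold ts b
      = if ts ≠ [] ∧ pvM (ts.map Prod.snd) > b.2
        then ts.getD (pvFmi (ts.map Prod.snd)) b else b := by
  induction ts with
  | nil => intro b; simp [pvBestFold]
  | cons t rest ih =>
    intro b
    have hstep : pvBestFold (t :: rest) b = pvBestFold rest (if t.2 > b.2 then t else b) := rfl
    rw [hstep, ih]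
    by_cases hr : rest = []
    · subst hr
      by_cases hc : t.2 > b.2 <;> simp [pvM, pvFmi, hc]
    · have hrm : rest.map Prod.snd ≠ [] := by simpa using hr
      have hflt := pvFmi_lt (rest.map Prod.snd) hrm
      rw [List.length_map] at hflt
      have hrt : (rest ≠ []) = True := by simp [hr]
      have hct : (t :: rest ≠ []) = True := by simp
      simp only [List.map_cons, pvM_cons _ _ hrm, pvFmi, hrm, ne_eq, not_false_iff,
        hrt, hct, true_and]
      rcases max_choice t.2 (pvM (rest.map Prod.snd)) with hmx | hmx
      · have h5 : pvM (rest.map Prod.snd) ≤ t.2 := hmx ▸ le_max_right _ _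
        rw [hmx]
        split_ifs <;> (try simp only [List.getD_cons_succ, List.getD_cons_zero]) <;> first | rfl | omega | exact pv_getD_irrel rest _ hflt _ _ | exact (pv_getD_irrel rest _ hflt _ _).symm
      · have h5 : t.2 ≤ pvM (rest.map Prod.snd) := hmx ▸ le_max_left _ _
        rw [hmx]
        split_ifs <;> (try simp only [List.getD_cons_succ, List.getD_cons_zero]) <;> first | rfl | omega | exact pv_getD_irrel rest _ hflt _ _ | exact (pv_getD_irrel rest _ hflt _ _).symm

theorem pv_fmi_zero (l : List Int) (d : Int) (h : pvM l ≤ l.getD 0 d) : pvFmi l = 0 := by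
  cases l with
  | nil => rfl
  | cons s rest =>
    simp only [List.getD_cons_zero] at h
    by_cases hr : rest = []
    · subst hr; rfl
    · rw [pvM_cons _ _ hr] at h
      simp only [pvFmi]
      rw [if_neg (by rintro ⟨-, hh⟩; omega)]

theorem pv_bestFold_head {α : Type} (ts : List (α × Int)) (d : α × Int) (h : ts ≠ []) :
    pvBestFold ts (ts.getD 0 d) = ts.getD (pvFmi (ts.map Prod.snd)) (ts.getD 0 d) := by
  rw [pv_bestFold_eq]
  split_ifs with hc
  · rfl
  · have hM : ¬ pvM (ts.map Prod.snd) > (ts.getD 0 d).2 := by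
      intro hgt; exact hc ⟨h, hgt⟩
    have hsnd : (ts.getD 0 d).2 = (ts.map Prod.snd).getD 0 d.2 := by
      cases ts with
      | nil => exact absurd rfl h
      | cons a t => rfl
    rw [pv_fmi_zero (ts.map Prod.snd) d.2 (by omega)]
    exact pv_getD_irrel ts 0 (by cases ts with | nil => exact absurd rfl h | cons a t => simp) _ _

-- enumerate facts
theorem pv_enum_len {α : Type} (l : List α) : ∀ (s : Int),
    (PySem.List.enumerate l s).length = l.length := by
  induction l with
  | nil => intro s; rfl
  | cons x t ih => intro s; simpa [PySem.List.enumerate] using ih (s+1)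

theorem pv_enum_map_snd {α : Type} (l : List α) : ∀ (s : Int),
    (PySem.List.enumerate l s).map Prod.snd = l := by
  induction l with
  | nil => intro s; rfl
  | cons x t ih => intro s; simpa [PySem.List.enumerate] using ih (s+1)

theorem pv_enum_getD {α : Type} (l : List α) : ∀ (s : Int) (i : Nat), i < l.length →
    ∀ (d : Int × α) (d' : α),
    (PySem.List.enumerate l s).getD i d = (s + (i : Int), l.getD i d') := by
  induction l with
  | nil => intro s i hi; simp at hi
  | cons x t ih =>
    intro s i hi d d'
    cases i with
    | zero => simp [PySem.List.enumerate]
    | succ n =>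
      have := ih (s+1) n (by simpa using hi) d d'
      simp only [PySem.List.enumerate, List.getD_cons_succ, this]
      rw [Prod.mk.injEq]
      refine ⟨by push_cast; ring, rfl⟩

theorem pv_enum_fst_ge {α : Type} (l : List α) : ∀ (s : Int), ∀ p ∈ PySem.List.enumerate l s,
    s ≤ p.1 := by
  induction l with
  | nil => intro s p hp; simp [PySem.List.enumerate] at hp
  | cons x t ih =>
    intro s p hp
    rcases List.mem_cons.mp hp with h | h
    · subst h; simp
    · have := ih (s+1) p h; omega

theorem pv_enum_filter_ne {α : Type} (l : List α) : ∀ (s : Int) (i : Nat), i < l.length →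
    (PySem.List.enumerate l s).filter (fun is => decide (is.1 ≠ s + (i : Int)))
      = (PySem.List.enumerate l s).eraseIdx i := by
  induction l with
  | nil => intro s i hi; simp at hi
  | cons x t ih =>
    intro s i hi
    cases i with
    | zero =>
      show ((s, x) :: PySem.List.enumerate t (s+1)).filter _
        = ((s, x) :: PySem.List.enumerate t (s+1)).eraseIdx 0
      rw [List.filter_cons]
      rw [if_neg (by simp)]
      rw [List.eraseIdx_cons_zero]
      apply List.filter_eq_self.mpr
      intro p hp
      have := pv_enum_fst_ge t (s+1) p hp
      simp only [ne_eq, Nat.cast_zero, add_zero, decide_eq_true_eq]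
      omega
    | succ n =>
      show ((s, x) :: PySem.List.enumerate t (s+1)).filter _
        = ((s, x) :: PySem.List.enumerate t (s+1)).eraseIdx (n+1)
      rw [List.filter_cons, if_pos (by
        simp only [ne_eq, decide_eq_true_eq]
        push_cast; omega)]
      rw [List.eraseIdx_cons_succ]
      congr 1
      have := ih (s+1) n (by simpa using hi)
      rw [← this]
      apply List.filter_congr
      intro p hp
      simp only [ne_eq, decide_eq_decide]
      push_cast
      constructor <;> (intro hh h2 ; apply hh; omega)

theorem pv_bestB_eq (scores : List Int) (h : scores ≠ []) :
    pvBestB scores = ((pvFmi scores : Int), pvM scores) := by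
  obtain ⟨s, rest, rfl⟩ : ∃ s rest, scores = s :: rest := by
    cases scores with
    | nil => exact absurd rfl h
    | cons s rest => exact ⟨s, rest, rfl⟩
  have hinit : ((0:Int), (s :: rest).headD 0)
      = (PySem.List.enumerate (s :: rest) 0).getD 0 ((0:Int), 0) := rfl
  have hB : pvBestB (s :: rest)
      = pvBestFold (PySem.List.enumerate (s :: rest) 0)
          ((PySem.List.enumerate (s :: rest) 0).getD 0 ((0:Int), 0)) := by
    rw [pvBestB, ← hinit]; rfl
  rw [hB, pv_bestFold_head _ _ (by simp [PySem.List.enumerate])]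
  rw [pv_enum_map_snd]
  have hlt := pvFmi_lt (s :: rest) (by simp)
  rw [pv_enum_getD (s :: rest) 0 (pvFmi (s :: rest)) hlt _ 0]
  rw [Prod.mk.injEq]
  exact ⟨by omega, pv_getD_fmi _ (by simp) _⟩

theorem pv_guardFold (ts : List (Int × Int)) (x : Int) : ∀ (b : Int × Int),
    ts.foldl (fun b is => if is.1 ≠ x ∧ is.2 > b.2 then is else b) b
      = pvBestFold (ts.filter fun is => decide (is.1 ≠ x)) b := by
  induction ts with
  | nil => intro b; rfl
  | cons t rest ih =>
    intro b
    by_cases hx : t.1 = x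
    · subst hx
      have hcond : ∀ c : Int × Int, (¬(t.1 = t.1) ∧ t.2 > c.2) = False := by simp
      have hdec : (decide (t.1 ≠ t.1)) = false := by simp
      simp only [List.foldl_cons, List.filter_cons, ne_eq, hcond, if_false, hdec,
        Bool.false_eq_true]
      exact ih b
    · have hd : (decide (t.1 ≠ x)) = true := by simp [hx]
      simp only [List.foldl_cons, List.filter_cons, hd, if_true]
      have hstep : ∀ c, pvBestFold (t :: c) b = pvBestFold c (if t.2 > b.2 then t else b) :=
        fun c => rfl
      rw [hstep]
      by_cases hgt : t.2 > b.2
      · rw [if_pos ⟨hx, hgt⟩, if_pos hgt]; exact ih t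
      · rw [if_neg (fun hc => hgt hc.2), if_neg hgt]; exact ih b

def pvLift (i0 i1 : Nat) : Nat := if i1 < i0 then i1 else i1 + 1

theorem pv_getD_eraseIdx {α : Type} (l : List α) (i j : Nat) (d : α)
    (hi : i < l.length) (hj : j < l.length - 1) :
    (l.eraseIdx i).getD j d = l.getD (pvLift i j) d := by
  have hjE : j < (l.eraseIdx i).length := by
    rw [List.length_eraseIdx_of_lt hi]; omega
  rw [List.getD_eq_getElem _ _ hjE, List.getElem_eraseIdx]
  unfold pvLift
  split
  · rw [List.getD_eq_getElem _ _ (by omega)]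
  · rw [List.getD_eq_getElem _ _ (by omega)]

theorem pv_secondB_eq (scores : List Int) (h2 : 2 ≤ scores.length) :
    (pvSecondB scores ((pvFmi scores : Int))).1
      = ((pvLift (pvFmi scores) (pvFmi (scores.eraseIdx (pvFmi scores))) : Nat) : Int) := by
  have hne : scores ≠ [] := by cases scores <;> simp_all
  have hi0 := pvFmi_lt scores hne
  have hlene : (scores.eraseIdx (pvFmi scores)).length = scores.length - 1 :=
    List.length_eraseIdx_of_lt hi0
  have hene : scores.eraseIdx (pvFmi scores) ≠ [] := by
    intro h; rw [h] at hlene; simp at hlene; omega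
  have hi1 := pvFmi_lt _ hene
  have henum_len : (PySem.List.enumerate scores 0).length = scores.length :=
    pv_enum_len scores 0
  have hlenF : ((PySem.List.enumerate scores 0).eraseIdx (pvFmi scores)).length
      = scores.length - 1 := by
    rw [List.length_eraseIdx_of_lt (by omega)]; omega
  have hFne : (PySem.List.enumerate scores 0).eraseIdx (pvFmi scores) ≠ [] := by
    intro h; rw [h] at hlenF; simp at hlenF; omega
  have hFsnd : ((PySem.List.enumerate scores 0).eraseIdx (pvFmi scores)).map Prod.snd
      = scores.eraseIdx (pvFmi scores) := by
    rw [← pv_map_eraseIdx, pv_enum_map_snd]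
  have hFgetD : ∀ (j : Nat), j < scores.length - 1 → ∀ (d : Int × Int),
      ((PySem.List.enumerate scores 0).eraseIdx (pvFmi scores)).getD j d
        = (((pvLift (pvFmi scores) j : Nat) : Int), scores.getD (pvLift (pvFmi scores) j) 0) := by
    intro j hj d
    rw [pv_getD_eraseIdx _ _ _ _ (by omega) (by omega)]
    have hlt : pvLift (pvFmi scores) j < scores.length := by
      unfold pvLift; split <;> omega
    rw [pv_enum_getD scores 0 _ hlt d 0]
    simp
  -- unfold pvSecondB and reshape the fold
  have hts := pv_enum_filter_ne scores 0 (pvFmi scores) hi0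
  rw [zero_add] at hts
  have hsfold : pvSecondB scores ((pvFmi scores : Int))
      = pvBestFold ((PySem.List.enumerate scores 0).eraseIdx (pvFmi scores))
          (let s0 : Int := if ((pvFmi scores : Int)) ≠ 0 then 0 else 1
           (s0, PySem.List.pyGetD scores s0 0)) := by
    rw [pvSecondB]
    rw [pv_guardFold, hts]
  rw [hsfold]
  -- the initial accumulator is entry 0 of the filtered list
  have hinit : (let s0 : Int := if ((pvFmi scores : Int)) ≠ 0 then 0 else 1
       ((s0, PySem.List.pyGetD scores s0 0) : Int × Int))
      = ((PySem.List.enumerate scores 0).eraseIdx (pvFmi scores)).getD 0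
          (let s0 : Int := if ((pvFmi scores : Int)) ≠ 0 then 0 else 1
           (s0, PySem.List.pyGetD scores s0 0)) := by
    rw [hFgetD 0 (by omega)]
    by_cases hz : pvFmi scores = 0
    · rw [hz]
      have hlift : pvLift 0 0 = 1 := by unfold pvLift; simp
      rw [hlift]
      simp only [ne_eq, Nat.cast_zero, not_true_eq_false, if_false, ite_false]
      rw [PySem.List.pyGetD_ofNat']
      simp
    · have hz' : ((pvFmi scores : Nat) : Int) ≠ 0 := by
        simpa using hz
      have hlift : pvLift (pvFmi scores) 0 = 0 := by unfold pvLift; simp; omega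
      rw [hlift]
      simp only [hz', ne_eq, not_false_iff, if_true, ite_true]
      rw [PySem.List.pyGetD_ofNat']
      simp
  rw [hinit, pv_bestFold_head _ _ hFne, hFsnd]
  rw [hFgetD _ (by omega)]

def pvSortR {α : Type} (ps : List (α × Int)) : List (α × Int) :=
  PySem.List.sorted ps (fun x => x.2) true

theorem pv_sortR_snoc {α : Type} (xs : List (α × Int)) (x : α × Int) :
    pvSortR (xs ++ [x])
      = PySem.List.insertBy (fun a b => decide ((b.2 : Int) < a.2)) x (pvSortR xs) := by
  rw [pvSortR, pvSortR, PySem.List.sorted_rev_eq_foldl_insertBy,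
    PySem.List.sorted_rev_eq_foldl_insertBy, List.foldl_append]
  rfl

theorem pv_insertBy_cons {α : Type} (bef : (α × Int) → (α × Int) → Bool) (x y : α × Int)
    (ys : List (α × Int)) :
    PySem.List.insertBy bef x (y :: ys)
      = if bef x y then x :: y :: ys else y :: PySem.List.insertBy bef x ys := rfl

theorem pv_sortR_sel {α : Type} (ps : List (α × Int)) (d : α × Int) (h : ps ≠ []) :
    pvSortR ps = ps.getD (pvFmi (ps.map Prod.snd)) d
      :: pvSortR (ps.eraseIdx (pvFmi (ps.map Prod.snd))) := by
  induction ps using List.reverseRecOn with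
  | nil => exact absurd rfl h
  | append_singleton xs x ih =>
    by_cases hxs : xs = []
    · subst hxs
      simp only [List.nil_append, List.map_cons, List.map_nil]
      have : pvFmi [x.2] = 0 := by simp [pvFmi]
      rw [this]
      simp only [List.getD_cons_zero, List.eraseIdx_cons_zero]
      rfl
    · have hsnd : xs.map Prod.snd ≠ [] := by simpa using hxs
      have hi0 := pvFmi_lt (xs.map Prod.snd) hsnd
      rw [List.length_map] at hi0
      have hm2 : (xs.getD (pvFmi (xs.map Prod.snd)) d).2 = pvM (xs.map Prod.snd) := by
        rw [← pv_getD_map Prod.snd xs _ hi0 d.2 d]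
        exact pv_getD_fmi _ hsnd _
      have hmap : (xs ++ [x]).map Prod.snd = xs.map Prod.snd ++ [x.2] := by simp
      rw [pv_sortR_snoc, ih hxs, hmap, pvFmi_snoc _ _ hsnd, pv_insertBy_cons]
      by_cases hx : pvM (xs.map Prod.snd) < x.2
      · rw [if_pos (by rw [hm2]; simpa using hx), if_pos hx]
        have hgd : (xs ++ [x]).getD (xs.map Prod.snd).length d = x := by
          rw [List.length_map, List.getD_eq_getElem _ _ (by simp)]
          simp
        have herase : (xs ++ [x]).eraseIdx (xs.map Prod.snd).length = xs := by
          rw [List.length_map, List.eraseIdx_append_of_length_le (le_refl _)]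
          simp
        rw [hgd, herase, ih hxs]
      · rw [if_neg (by rw [hm2]; simpa using hx), if_neg hx]
        have hgd : (xs ++ [x]).getD (pvFmi (xs.map Prod.snd)) d
            = xs.getD (pvFmi (xs.map Prod.snd)) d := List.getD_append _ _ _ _ hi0
        have herase : (xs ++ [x]).eraseIdx (pvFmi (xs.map Prod.snd))
            = xs.eraseIdx (pvFmi (xs.map Prod.snd)) ++ [x] :=
          List.eraseIdx_append_of_lt_length hi0 _
        rw [hgd, herase, ← pv_sortR_snoc]

-- proof-side views of one loop step
def pvScore (P : List (List String)) (block : List (List String)) (c : List String) : Int :=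
  (block.map fun m => pvCompatA c m P).sum

def pvCacheInv (P : List (List String))
    (cache : PySem.Dict (List String) (PySem.Set Int)) : Prop :=
  ∀ t a, cache.get? t = some a → a = pvAttendB P t

theorem pv_attOf_fst (P : List (List String))
    (cache : PySem.Dict (List String) (PySem.Set Int)) (t : List String)
    (hinv : pvCacheInv P cache) : (pvAttOf P cache t).1 = pvAttendB P t := by
  rw [pvAttOf]
  cases hg : cache.get? t with
  | none => rfl
  | some a => exact hinv t a hg

theorem pv_attOf_inv (P : List (List String))
    (cache : PySem.Dict (List String) (PySem.Set Int)) (t : List String)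
    (hinv : pvCacheInv P cache) : pvCacheInv P (pvAttOf P cache t).2 := by
  rw [pvAttOf]
  cases hg : cache.get? t with
  | some a => exact hinv
  | none =>
    intro u b hb
    by_cases hu : u = t
    · subst hu
      rw [PySem.Dict.get?_insert_self] at hb
      cases hb; rfl
    · rw [PySem.Dict.get?_insert_of_ne _ _ hu] at hb
      exact hinv u b hb

theorem pv_updScores (P : List (List String)) :
    ∀ (scores : List Int) (rem : List (List String))
      (cache : PySem.Dict (List String) (PySem.Set Int)) (ca : PySem.Set Int),
      pvCacheInv P cache →
      (pvUpdScores P cache ca scores rem).1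
          = List.zipWith (fun s t => s - PySem.Set.len (PySem.Set.inter ca (pvAttendB P t)))
              scores rem
        ∧ pvCacheInv P (pvUpdScores P cache ca scores rem).2 := by
  intro scores
  induction scores with
  | nil => intro rem cache ca hinv; exact ⟨rfl, hinv⟩
  | cons sc ss ih =>
    intro rem cache ca hinv
    cases rem with
    | nil => exact ⟨rfl, hinv⟩
    | cons t ts =>
      have hfst := pv_attOf_fst P cache t hinv
      have hinv1 := pv_attOf_inv P cache t hinv
      obtain ⟨h1, h2⟩ := ih ts (pvAttOf P cache t).2 ca hinv1
      rw [pvUpdScores]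
      exact ⟨by rw [List.zipWith_cons_cons, ← h1, hfst], h2⟩

def pvChosenA (P : List (List String)) (pp : PySem.Set (Int × Int)) (bi : Int)
    (block r : List (List String)) (pos : Int) : List String :=
  if block.isEmpty then r.headD []
  else
    let cws := r.map fun c => (c, (block.map fun m => pvCompatA c m P).sum)
    let sortedCws := PySem.List.sorted cws (fun x => x.2) true
    if pp.contains (bi, pos) ∧ 1 < cws.length then
      (PySem.List.pyGetD sortedCws 1 ([], 0)).1
    else
      (PySem.List.pyGetD sortedCws 0 ([], 0)).1

def pvChosenB (pp : PySem.Set (Int × Int)) (bi : Int) (block : List (List String))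
    (rem : List (List String)) (scores : List Int) (pos : Int) : List String :=
  if block.isEmpty then rem.headD []
  else
    let best := pvBestB scores
    if pp.contains (bi, pos) ∧ 1 < rem.length then
      PySem.List.pyGetD rem (pvSecondB scores best.1).1 []
    else
      PySem.List.pyGetD rem best.1 []

theorem pv_whileA_succ (P : List (List String)) (pp : PySem.Set (Int × Int)) (bi k : Int)
    (fuel : Nat) (block r : List (List String)) (pos : Int) :
    pvWhileA P pp bi k (fuel+1) block r pos
      = if (block.length : Int) < k ∧ r ≠ [] then
          pvWhileA P pp bi k fuel (block ++ [pvChosenA P pp bi block r pos])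
            (match PySem.List.remove? r (pvChosenA P pp bi block r pos) with
             | some r' => r'
             | none => r) (pos + 1)
        else (block, r) := rfl

theorem pv_whileB_succ (P : List (List String)) (pp : PySem.Set (Int × Int)) (bi k : Int)
    (fuel : Nat) (block rem : List (List String)) (scores : List Int)
    (cache : PySem.Dict (List String) (PySem.Set Int)) (pos : Int) :
    pvWhileB P pp bi k (fuel+1) block rem scores cache pos
      = if (block.length : Int) < k ∧ rem ≠ [] then
          pvWhileB P pp bi k fuel (block ++ [pvChosenB pp bi block rem scores pos])
            (rem.eraseIdx ((PySem.List.index? rem (pvChosenB pp bi block rem scores pos)).getD 0))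
            (if ((block ++ [pvChosenB pp bi block rem scores pos]).length : Int) < k ∧
                rem.eraseIdx ((PySem.List.index? rem (pvChosenB pp bi block rem scores pos)).getD 0) ≠ [] then
              pvUpdScores P (pvAttOf P cache (pvChosenB pp bi block rem scores pos)).2
                (pvAttOf P cache (pvChosenB pp bi block rem scores pos)).1
                (scores.eraseIdx ((PySem.List.index? rem (pvChosenB pp bi block rem scores pos)).getD 0))
                (rem.eraseIdx ((PySem.List.index? rem (pvChosenB pp bi block rem scores pos)).getD 0))
             else (scores, cache)).1
            (if ((block ++ [pvChosenB pp bi block rem scores pos]).length : Int) < k ∧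
                rem.eraseIdx ((PySem.List.index? rem (pvChosenB pp bi block rem scores pos)).getD 0) ≠ [] then
              pvUpdScores P (pvAttOf P cache (pvChosenB pp bi block rem scores pos)).2
                (pvAttOf P cache (pvChosenB pp bi block rem scores pos)).1
                (scores.eraseIdx ((PySem.List.index? rem (pvChosenB pp bi block rem scores pos)).getD 0))
                (rem.eraseIdx ((PySem.List.index? rem (pvChosenB pp bi block rem scores pos)).getD 0))
             else (scores, cache)).2
            (pos + 1)
        else (block, rem, cache) := rfl

theorem pv_whileA_stop (P : List (List String)) (pp : PySem.Set (Int × Int)) (bi k : Int)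
    (block r : List (List String)) (pos : Int)
    (h : ¬ ((block.length : Int) < k ∧ r ≠ [])) :
    ∀ fuel, pvWhileA P pp bi k fuel block r pos = (block, r) := by
  intro fuel
  cases fuel with
  | zero => rfl
  | succ fuel => rw [pv_whileA_succ, if_neg h]

theorem pv_whileB_stop (P : List (List String)) (pp : PySem.Set (Int × Int)) (bi k : Int)
    (block rem : List (List String)) (scores : List Int)
    (cache : PySem.Dict (List String) (PySem.Set Int)) (pos : Int)
    (h : ¬ ((block.length : Int) < k ∧ rem ≠ [])) :
    ∀ fuel, pvWhileB P pp bi k fuel block rem scores cache pos = (block, rem, cache) := by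
  intro fuel
  cases fuel with
  | zero => rfl
  | succ fuel => rw [pv_whileB_succ, if_neg h]

theorem pv_chosen_spec (P : List (List String)) (pp : PySem.Set (Int × Int)) (bi : Int)
    (block r : List (List String)) (pos : Int) (hne : r ≠ []) :
    ∃ i, i < r.length ∧ pvChosenA P pp bi block r pos = r.getD i [] ∧
      pvChosenB pp bi block r (r.map (pvScore P block)) pos = r.getD i [] := by
  have hsne : r.map (pvScore P block) ≠ [] := by simpa using hne
  by_cases hb : block.isEmpty
  · refine ⟨0, by cases r <;> simp_all, ?_, ?_⟩
    · rw [pvChosenA, if_pos hb]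
      cases r with
      | nil => exact absurd rfl hne
      | cons a t => rfl
    · rw [pvChosenB, if_pos hb]
      cases r with
      | nil => exact absurd rfl hne
      | cons a t => rfl
  · set scores := r.map (pvScore P block) with hscdef
    set cws := r.map (fun c => (c, pvScore P block c)) with hcwsdef
    have hcwsne : cws ≠ [] := by simp [hcwsdef]; intro h; exact hne h
    have hsnds : cws.map Prod.snd = scores := by
      rw [hcwsdef, hscdef, List.map_map]; rfl
    have hi0lt : pvFmi scores < r.length := by
      have := pvFmi_lt scores hsne
      rwa [hscdef, List.length_map] at this
    have hbest1 : (pvBestB scores).1 = ((pvFmi scores : Nat) : Int) := by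
      rw [pv_bestB_eq scores hsne]
    have hlam : (fun c => (c, (block.map fun m => pvCompatA c m P).sum))
        = (fun c => (c, pvScore P block c)) := rfl
    have hsorteq : PySem.List.sorted cws (fun x => x.2) true = pvSortR cws := rfl
    have hsel := pv_sortR_sel cws ([], 0) hcwsne
    rw [hsnds] at hsel
    by_cases hp : pp.contains (bi, pos) ∧ 1 < r.length
    · -- perturbation: second-best
      have h2 : 2 ≤ scores.length := by rw [hscdef, List.length_map]; omega
      have hene : scores.eraseIdx (pvFmi scores) ≠ [] := by
        intro h
        have := List.length_eraseIdx_of_lt (l := scores) (i := pvFmi scores)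
          (by rw [hscdef, List.length_map]; exact hi0lt)
        rw [h] at this; simp at this; omega
      have hi1lt : pvFmi (scores.eraseIdx (pvFmi scores)) < scores.length - 1 := by
        have := pvFmi_lt _ hene
        rwa [List.length_eraseIdx_of_lt (by rw [hscdef, List.length_map]; exact hi0lt)] at this
      have hliftlt : pvLift (pvFmi scores) (pvFmi (scores.eraseIdx (pvFmi scores))) < r.length := by
        have hlen : scores.length = r.length := by rw [hscdef, List.length_map]
        unfold pvLift; split <;> omega
      refine ⟨pvLift (pvFmi scores) (pvFmi (scores.eraseIdx (pvFmi scores))), hliftlt, ?_, ?_⟩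
      · -- A side
        rw [pvChosenA, if_neg (by simpa using hb)]
        simp only [hlam, ← hcwsdef, hsorteq]
        rw [if_pos (by simpa [hcwsdef, List.length_map] using hp)]
        rw [hsel]
        have hcws'ne : cws.eraseIdx (pvFmi scores) ≠ [] := by
          intro h
          have h2' : (cws.eraseIdx (pvFmi scores)).map Prod.snd = scores.eraseIdx (pvFmi scores) := by
            rw [← pv_map_eraseIdx, hsnds]
          rw [h] at h2'; exact hene h2'.symm
        have hsel2 := pv_sortR_sel (cws.eraseIdx (pvFmi scores)) ([], 0) hcws'ne
        have h2' : (cws.eraseIdx (pvFmi scores)).map Prod.snd = scores.eraseIdx (pvFmi scores) := by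
          rw [← pv_map_eraseIdx, hsnds]
        rw [h2'] at hsel2
        rw [hsel2, PySem.List.pyGetD_ofNat', List.getD_cons_succ, List.getD_cons_zero]
        have hcwse : cws.eraseIdx (pvFmi scores) = (r.eraseIdx (pvFmi scores)).map
            (fun c => (c, pvScore P block c)) := by
          rw [hcwsdef, pv_map_eraseIdx]
        rw [hcwse]
        have hi1lt' : pvFmi (scores.eraseIdx (pvFmi scores)) < (r.eraseIdx (pvFmi scores)).length := by
          rw [List.length_eraseIdx_of_lt hi0lt]
          have : scores.length = r.length := by rw [hscdef, List.length_map]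
          omega
        rw [pv_getD_map _ _ _ hi1lt' ([], 0) []]
        rw [pv_getD_eraseIdx r _ _ [] hi0lt (by
          have : scores.length = r.length := by rw [hscdef, List.length_map]
          omega)]
      · -- B side
        rw [pvChosenB, if_neg (by simpa using hb)]
        simp only [← hscdef]
        rw [if_pos hp]
        rw [hbest1, pv_secondB_eq scores h2, PySem.List.pyGetD_natCast]
    · -- no perturbation: best
      refine ⟨pvFmi scores, hi0lt, ?_, ?_⟩
      · rw [pvChosenA, if_neg (by simpa using hb)]
        simp only [hlam, ← hcwsdef, hsorteq]
        rw [if_neg (by simpa [hcwsdef, List.length_map] using hp)]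
        rw [hsel, PySem.List.pyGetD_ofNat', List.getD_cons_zero]
        rw [hcwsdef, pv_getD_map _ _ _ hi0lt ([], 0) []]
      · rw [pvChosenB, if_neg (by simpa using hb)]
        simp only [← hscdef]
        rw [if_neg hp]
        rw [hbest1, PySem.List.pyGetD_natCast]

theorem pv_score_snoc (P : List (List String)) (block : List (List String))
    (m c : List String) :
    pvScore P (block ++ [m]) c
      = pvScore P block c - PySem.Set.len (PySem.Set.inter (pvAttendB P m) (pvAttendB P c)) := by
  rw [pvScore, pvScore, List.map_append, List.sum_append]
  simp [pv_compat_eq c m P, sub_eq_add_neg]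

theorem pv_while_eq (P : List (List String)) (pp : PySem.Set (Int × Int)) (bi k : Int) :
    ∀ (fuel : Nat) (block r : List (List String)) (pos : Int)
      (cache : PySem.Dict (List String) (PySem.Set Int)), pvCacheInv P cache →
    ∃ c', pvCacheInv P c' ∧
      pvWhileB P pp bi k fuel block r (r.map (pvScore P block)) cache pos
        = ((pvWhileA P pp bi k fuel block r pos).1,
           (pvWhileA P pp bi k fuel block r pos).2, c') := by
  intro fuel
  induction fuel with
  | zero => intro block r pos cache hinv; exact ⟨cache, hinv, rfl⟩
  | succ fuel ih =>
    intro block r pos cache hinv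
    rw [pv_whileA_succ, pv_whileB_succ]
    by_cases hc : (block.length : Int) < k ∧ r ≠ []
    · rw [if_pos hc, if_pos hc]
      obtain ⟨i, hi, hA, hB⟩ := pv_chosen_spec P pp bi block r pos hc.2
      have hmem : r.getD i [] ∈ r := by
        rw [List.getD_eq_getElem _ _ hi]; exact List.getElem_mem _
      obtain ⟨j, hj⟩ : ∃ j, List.idxOf? (r.getD i []) r = some j := by
        cases hjj : List.idxOf? (r.getD i []) r with
        | none => exact absurd (List.idxOf?_eq_none_iff.mp hjj) (by simpa using hmem)
        | some j => exact ⟨j, rfl⟩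
      have hidx : (PySem.List.index? r (pvChosenB pp bi block r (r.map (pvScore P block)) pos)).getD 0 = j := by
        rw [hB, PySem.List.index?, hj]
        rfl
      have hrem : (match PySem.List.remove? r (pvChosenA P pp bi block r pos) with
          | some r' => r'
          | none => r) = r.eraseIdx j := by
        rw [hA, pv_remove?_eraseIdx r _ hmem, hj]
        rfl
      rw [hrem, hidx, hB, hA]
      by_cases hnext : ((block ++ [r.getD i []]).length : Int) < k ∧ r.eraseIdx j ≠ []
      · rw [if_pos hnext]
        have hfst := pv_attOf_fst P cache (r.getD i []) hinv
        have hinv1 := pv_attOf_inv P cache (r.getD i []) hinv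
        obtain ⟨hupd, hinv2⟩ := pv_updScores P ((r.map (pvScore P block)).eraseIdx j)
          (r.eraseIdx j) (pvAttOf P cache (r.getD i [])).2 (pvAttOf P cache (r.getD i [])).1 hinv1
        rw [hupd, hfst]
        have hscE : (r.map (pvScore P block)).eraseIdx j = (r.eraseIdx j).map (pvScore P block) :=
          pv_map_eraseIdx _ _ _
        have hzip : List.zipWith
              (fun s t => s - PySem.Set.len (PySem.Set.inter (pvAttendB P (r.getD i []))
                (pvAttendB P t)))
              ((r.map (pvScore P block)).eraseIdx j) (r.eraseIdx j)
            = (r.eraseIdx j).map (pvScore P (block ++ [r.getD i []])) := by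
          rw [hscE, pv_zipWith_map_left]
          apply List.map_congr_left
          intro c _
          rw [pv_score_snoc]
        rw [hzip]
        rw [hfst] at hinv2
        exact ih (block ++ [r.getD i []]) (r.eraseIdx j) (pos + 1) _ hinv2
      · rw [if_neg hnext]
        rw [pv_whileA_stop P pp bi k _ _ _ hnext fuel,
          pv_whileB_stop P pp bi k _ _ _ _ _ hnext fuel]
        exact ⟨cache, hinv, rfl⟩
    · rw [if_neg hc, if_neg hc]
      exact ⟨cache, hinv, rfl⟩

theorem pv_count_eq (P : List (List String)) (pp : PySem.Set (Int × Int)) (k : Int)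
    (btype : String) : ∀ (c : Nat) (r : List (List String))
    (result : List (List (List String) × String)) (bi : Int)
    (cache : PySem.Dict (List String) (PySem.Set Int)), pvCacheInv P cache →
    ∃ c', pvCacheInv P c' ∧
      pvCountB P pp k btype c r result cache bi
        = ((pvCountA P pp k btype c r result bi).1,
           (pvCountA P pp k btype c r result bi).2.1, c',
           (pvCountA P pp k btype c r result bi).2.2) := by
  intro c
  induction c with
  | zero => intro r result bi cache hinv; exact ⟨cache, hinv, rfl⟩
  | succ c ih =>
    intro r result bi cache hinv
    have hrep : List.replicate r.length (0 : Int) = r.map (pvScore P []) :=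
      (pv_map_const_replicate r 0).symm
    simp only [pvCountA, pvCountB, hrep]
    obtain ⟨c1, hc1, heq⟩ := pv_while_eq P pp bi k r.length [] r 0 cache hinv
    rw [heq]
    exact ih _ _ _ c1 hc1

theorem pv_specs_eq (P : List (List String)) (pp : PySem.Set (Int × Int)) :
    ∀ (specs : List (Int × Int × Int × String)) (d : PySem.Dict Int (List (List String)))
      (result : List (List (List String) × String)) (bi : Int)
      (cache : PySem.Dict (List String) (PySem.Set Int)), pvCacheInv P cache →
    pvSpecsB P pp specs d result cache bi = pvSpecsA P pp specs d result bi := by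
  intro specs
  induction specs with
  | nil => intros; rfl
  | cons spec rest ih =>
    intro d result bi cache hinv
    obtain ⟨n, k, count, btype⟩ := spec
    simp only [pvSpecsA, pvSpecsB]
    obtain ⟨c', hc', heq⟩ := pv_count_eq P pp k btype count.toNat (d.getD n []) result bi cache hinv
    rw [heq]
    exact ih _ _ _ c' hc'

theorem pv_main : ∀ tbn specs prefs pp,
    partition_greedy_variable_n_py tbn specs prefs pp
      = partition_greedy_variable_n_py_alt tbn specs prefs pp := by
  intro tbn specs prefs pp
  rw [partition_greedy_variable_n_py, partition_greedy_variable_n_py_alt]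
  have hempty : pvCacheInv ((PySem.Dict.ofList prefs).values) PySem.Dict.empty := by
    intro t a h
    rw [PySem.Dict.get?_empty] at h
    cases h
  exact (pv_specs_eq ((PySem.Dict.ofList prefs).values) (pp.getD PySem.Set.empty) specs
    ⟨(PySem.Dict.ofList tbn).items.map fun p => (p.1, p.2)⟩ [] 0 PySem.Dict.empty hempty).symm

-- ===== VERDICT (by name: the statement is the Claim_ definition above) =====
theorem partition_greedy_variable_n_py_spec : Claim_equal_partition_greedy_variable_n_py := by
  intro tbn specs prefs pp _
  exact pv_main tbn specs prefs pp
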